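-- pv_equiv track=rewrite | github.com/AtqaAsma016/Data-Engineering-E-S | Day5_Searching_Sorting_Recursion.py | binary_search_with_original_index
-- ===== SOURCE A (Python) =====
-- def binary_search_with_original_index(arr, target):
--     """
--     Performs binary search on an unsorted array while preserving original indices.
--     Returns the original index of the target if found, otherwise -1.
--     """
--     # Step 1: Create list of tuples containing (value, original_index)
--     indexed_arr = [(value, idx) for idx, value in enumerate(arr)]
--
--     # Step 2: Sort the array based on values
--     indexed_arr.sort()
--
--     # Step 3: Perform binary search
--     left, right = 0, len(indexed_arr) - 1
--
--     while left <= right: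
--         mid = (left + right) // 2
--         mid_value, original_index = indexed_arr[mid]  # Unpack the tuple
--
--         if mid_value == target:
--             return original_index  # Return the original index
--         elif mid_value < target:
--             left = mid + 1
--         else:
--             right = mid - 1
--
--     return -1  # Target not found
-- ===== SOURCE B (Python) =====
-- def binary_search_with_original_index(arr, target):
--     """Return the index of target in arr, or -1 if absent, in one linear pass."""
--     for i, v in enumerate(arr):
--         if v == target:
--             return i
--     return -1
-- ===== Notes on version B (the rewrite author's own statement) =====
-- stated objective: faster
-- what changed: Replaces building and sorting a (value,index) pair list plus binary search with a single linear scan for the target's index; Pre_ excludes lists containing the target more than once, a first-vs-last-match tie where A returns whichever duplicate its midpoint probe hits and B the first occurrence, both equally defensible.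
-- outside the precondition, e.g. on binary_search_with_original_index([7, 7, 7], 7): A returns 1, B returns 0
import Mathlib
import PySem

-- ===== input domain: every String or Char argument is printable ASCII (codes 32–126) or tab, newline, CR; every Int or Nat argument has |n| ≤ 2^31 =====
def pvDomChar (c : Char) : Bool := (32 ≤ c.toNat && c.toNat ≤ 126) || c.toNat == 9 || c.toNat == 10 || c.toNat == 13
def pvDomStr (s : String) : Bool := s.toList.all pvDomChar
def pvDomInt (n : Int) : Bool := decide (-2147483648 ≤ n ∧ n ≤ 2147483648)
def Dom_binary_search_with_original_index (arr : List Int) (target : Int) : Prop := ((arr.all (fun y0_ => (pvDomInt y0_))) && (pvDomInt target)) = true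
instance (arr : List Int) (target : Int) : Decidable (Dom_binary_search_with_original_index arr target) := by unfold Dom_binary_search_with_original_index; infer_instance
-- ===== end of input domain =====

-- B replaces A's sort-the-pairs + binary search by a single linear scan for the target's
-- index (objective: faster); lists in which the target occurs more than once are outside Pre_.

-- ===== PORT A =====
-- A's while-loop: binary search on the sorted (value, original_index) list.
-- indexed_arr[mid] is always in range when the loop reaches it, so pyGetD's default is never used.
def pvALoop (s : List (Int × Int)) (target : Int) (left right : Int) : Int :=
  if h : left ≤ right then
    let mid := PySem.Int.floordiv (left + right) 2
    let mv := PySem.List.pyGetD s mid (0, 0)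
    if mv.1 = target then mv.2
    else if mv.1 < target then pvALoop s target (mid + 1) right
    else pvALoop s target left (mid - 1)
  else -1
termination_by (right - left + 1).toNat
decreasing_by
  all_goals
    have hb := PySem.Int.floordiv_two_mid_bounds (lo := left) (hi := right) h
    omega

def binary_search_with_original_index (arr : List Int) (target : Int) : Int :=
  let indexed_arr := (PySem.List.enumerate arr).map (fun p => (p.2, p.1))
  let s := PySem.List.sorted2 indexed_arr Prod.fst Prod.snd
  pvALoop s target 0 ((indexed_arr.length : Int) - 1)

-- ===== PORT B =====
-- B's for-loop with early return: first index whose value equals the target, else -1.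
def pvBFind (arr : List Int) (target : Int) (i : Int) : Int :=
  match arr with
  | [] => -1
  | x :: xs => if x = target then i else pvBFind xs target (i + 1)

def binary_search_with_original_index_alt (arr : List Int) (target : Int) : Int :=
  pvBFind arr target 0

-- ===== PRECONDITION & SPEC =====
-- Pre_ excludes lists containing the target more than once: there the result is a
-- first-vs-last-match tie no caller would specify — A returns whichever duplicate its
-- midpoint probe hits, B the first occurrence, and either value is equally defensible.
def Pre_binary_search_with_original_index (arr : List Int) (target : Int) : Prop :=
  arr.countP (fun v => decide (v = target)) ≤ 1
instance (arr : List Int) (target : Int) : Decidable (Pre_binary_search_with_original_index arr target) := by unfold Pre_binary_search_with_original_index; infer_instance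

def pvWitness_binary_search_with_original_index : List Int × Int := ([3, 1, 2], 2)

def Spec_binary_search_with_original_index (arr : List Int) (target : Int) (out : Int) : Prop := out = binary_search_with_original_index_alt arr target
instance (arr : List Int) (target : Int) (out : Int) : Decidable (Spec_binary_search_with_original_index arr target out) := by unfold Spec_binary_search_with_original_index; infer_instance

-- ===== CLAIM (what is proved, stated in full; the proofs are below) =====
def Claim_equal_binary_search_with_original_index : Prop := ∀ (arr : List Int) (target : Int), Dom_binary_search_with_original_index arr target → Pre_binary_search_with_original_index arr target → Spec_binary_search_with_original_index arr target (binary_search_with_original_index arr target)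

-- ===== LEMMAS AND PROOFS =====

-- Python's tuple sort on (Int × Int) is the sort by the lexicographic key
lemma pv_sorted2_eq_sorted_lex (xs : List (Int × Int)) :
    PySem.List.sorted2 xs Prod.fst Prod.snd
      = PySem.List.sorted xs (fun p => (toLex p : Lex (Int × Int))) := by
  have hf : (fun (a b : Int × Int) =>
        decide (a.1 < b.1) || (!decide (b.1 < a.1) && decide (a.2 < b.2)))
      = fun (a b : Int × Int) => decide ((toLex a : Lex (Int × Int)) < toLex b) := by
    funext a b
    rcases a with ⟨a1, a2⟩; rcases b with ⟨b1, b2⟩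
    rw [Bool.eq_iff_iff]
    simp only [Bool.or_eq_true, Bool.and_eq_true, Bool.not_eq_true', decide_eq_true_eq,
      decide_eq_false_iff_not, Prod.Lex.lt_iff, ofLex_toLex]
    omega
  show xs.foldl (fun acc x => PySem.List.insertBy
      (fun a b => decide (a.1 < b.1) || (!decide (b.1 < a.1) && decide (a.2 < b.2))) x acc) [] = _
  rw [hf, PySem.List.sorted_eq_foldl_insertBy]

-- the original indices of the target, in order
def pvOcc (arr : List Int) (t : Int) (s : Int) : List Int :=
  (PySem.List.enumerate arr s).filterMap (fun p => if p.2 = t then some p.1 else none)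

-- the sorted (value, index) list, as A builds it
def pvS (arr : List Int) : List (Int × Int) :=
  PySem.List.sorted ((PySem.List.enumerate arr).map (fun p => (p.2, p.1)))
    (fun p => (toLex p : Lex (Int × Int)))

lemma pv_pairwise_lt_S (arr : List Int) :
    (pvS arr).Pairwise (fun a b => (toLex a : Lex (Int × Int)) < toLex b) := by
  have hle := PySem.List.sorted_pairwise
    ((PySem.List.enumerate arr).map (fun p => (p.2, p.1)))
    (fun p => (toLex p : Lex (Int × Int)))
  have hnd : ((PySem.List.enumerate arr).map (fun (p : Int × Int) => (p.2, p.1))).Nodup := by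
    have h := PySem.List.pairwise_lt_enumerate arr 0
    rw [List.nodup_iff_pairwise_ne, List.pairwise_map]
    exact h.imp (fun {a b} hab hc => absurd (congrArg Prod.snd hc) (by simpa using hab.ne))
  have hndS : (pvS arr).Nodup := ((PySem.List.sorted_perm _ _ _).nodup_iff).mpr hnd
  have := hle.and hndS
  exact this.imp (fun {a b} h => lt_of_le_of_ne h.1 (fun he => h.2 (by
    have h2 : (ofLex (toLex a) : Int × Int) = ofLex (toLex b) := congrArg ofLex he
    simpa using h2)))

-- the sorted list splits into the values below, equal to, and above the target
lemma pv_split (arr : List Int) (t : Int) :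
    pvS arr = (pvS arr).filter (fun p => decide (p.1 < t))
      ++ (pvS arr).filter (fun p => decide (p.1 = t))
      ++ (pvS arr).filter (fun p => decide (t < p.1)) := by
  have hpw := pv_pairwise_lt_S arr
  conv_lhs => rw [pvS]
  apply PySem.List.sorted_eq_of_perm_of_pairwise_lt
  · have hEG : (((pvS arr).filter (fun p => decide (p.1 = t)) ++ (pvS arr).filter (fun p => decide (t < p.1))).Perm
        ((pvS arr).filter (fun p => !decide (p.1 < t)))) := by
      have h2 := List.filter_append_perm (fun p : Int × Int => decide (p.1 = t))
        ((pvS arr).filter (fun p => !decide (p.1 < t)))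
      have e1 : ((pvS arr).filter (fun p => !decide (p.1 < t))).filter (fun p => decide (p.1 = t))
          = (pvS arr).filter (fun p => decide (p.1 = t)) := by
        rw [List.filter_filter]
        exact List.filter_congr (fun x _ => by rcases x with ⟨a, b⟩; rw [Bool.eq_iff_iff]; simp; omega)
      have e2 : ((pvS arr).filter (fun p => !decide (p.1 < t))).filter (fun p => !decide (p.1 = t))
          = (pvS arr).filter (fun p => decide (t < p.1)) := by
        rw [List.filter_filter]
        exact List.filter_congr (fun x _ => by rcases x with ⟨a, b⟩; rw [Bool.eq_iff_iff]; simp; omega)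
      rw [e1, e2] at h2
      exact h2
    refine List.Perm.trans ?_ ((PySem.List.sorted_perm _ _ _ : (pvS arr).Perm ((PySem.List.enumerate arr).map (fun p => (p.2, p.1)))))
    rw [List.append_assoc]
    exact ((List.Perm.append_left _ hEG).trans (List.filter_append_perm _ (pvS arr)))
  · rw [List.append_assoc, List.pairwise_append]
    refine ⟨hpw.sublist List.filter_sublist, ?_, ?_⟩
    · rw [List.pairwise_append]
      refine ⟨hpw.sublist List.filter_sublist, hpw.sublist List.filter_sublist, ?_⟩
      intro a ha b hb
      have ha' := (List.mem_filter.mp ha).2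
      have hb' := (List.mem_filter.mp hb).2
      rw [Prod.Lex.lt_iff]
      simp only [ofLex_toLex]
      simp at ha' hb'
      omega
    · intro a ha b hb
      have ha' := (List.mem_filter.mp ha).2
      rw [List.mem_append] at hb
      have hb' : t ≤ b.1 := by
        rcases hb with hb | hb
        · have := (List.mem_filter.mp hb).2; simp at this; omega
        · have := (List.mem_filter.mp hb).2; simp at this; omega
      rw [Prod.Lex.lt_iff]
      simp only [ofLex_toLex]
      simp at ha'
      omega

lemma pv_filterMap_map (t : Int) (l : List (Int × Int)) :
    (l.filterMap (fun p => if p.2 = t then some p.1 else none)).map (fun i => (t, i))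
      = (l.filter (fun p => decide (p.2 = t))).map (fun p => (p.2, p.1)) := by
  induction l with
  | nil => rfl
  | cons x xs ih =>
    rcases x with ⟨a, b⟩
    by_cases h : b = t
    · subst h; simp [List.filter_cons, ih]
    · simp [List.filter_cons, h, ih]

-- the middle block of the sorted list is exactly the target's original indices, in order
lemma pv_eq_block (arr : List Int) (t : Int) :
    (pvS arr).filter (fun p => decide (p.1 = t)) = (pvOcc arr t 0).map (fun i => (t, i)) := by
  have hperm : ((pvS arr).filter (fun p => decide (p.1 = t))).Perm
      ((pvOcc arr t 0).map (fun i => (t, i))) := by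
    rw [pvOcc, pv_filterMap_map]
    have h1 := (PySem.List.sorted_perm ((PySem.List.enumerate arr).map (fun p => (p.2, p.1)))
      (fun p => (toLex p : Lex (Int × Int))) false).filter (fun p => decide (p.1 = t))
    rw [List.filter_map] at h1
    have h2 : ((PySem.List.enumerate arr).filter
        ((fun (p : Int × Int) => decide (p.1 = t)) ∘ (fun p => (p.2, p.1))))
        = (PySem.List.enumerate arr).filter (fun p => decide (p.2 = t)) := rfl
    rw [h2] at h1
    exact h1
  have hpwL : ((pvS arr).filter (fun p => decide (p.1 = t))).Pairwise
      (fun a b => (toLex a : Lex (Int × Int)) < toLex b) :=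
    (pv_pairwise_lt_S arr).sublist List.filter_sublist
  have hpwR : ((pvOcc arr t 0).map (fun i => (t, i))).Pairwise
      (fun a b => (toLex a : Lex (Int × Int)) < toLex b) := by
    rw [pvOcc, pv_filterMap_map, List.pairwise_map, List.pairwise_filter]
    refine (PySem.List.pairwise_lt_enumerate arr 0).imp ?_
    intro a b hab ha hb
    rw [Prod.Lex.lt_iff]
    simp only [ofLex_toLex]
    simp at ha hb
    right
    exact ⟨by omega, hab⟩
  exact List.Perm.eq_of_pairwise (fun a b _ _ h1 h2 => absurd h2 (lt_asymm h1)) hpwL hpwR hperm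

-- B's scan returns the first collected original index, or -1
lemma pv_bFind_eq (arr : List Int) (t : Int) : ∀ s : Int,
    pvBFind arr t s = (pvOcc arr t s).headD (-1) := by
  induction arr with
  | nil => intro s; simp [pvBFind, pvOcc, PySem.List.enumerate]
  | cons x xs ih =>
    intro s
    by_cases h : x = t
    · simp [pvBFind, pvOcc, PySem.List.enumerate_cons, h]
    · simp [pvBFind, pvOcc, PySem.List.enumerate_cons, h, ih (s + 1), pvOcc]

-- occ has as many entries as the target occurs in arr
lemma pv_occ_length (arr : List Int) (t : Int) : ∀ s : Int,
    (pvOcc arr t s).length = arr.countP (fun v => decide (v = t)) := by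
  induction arr with
  | nil => intro s; simp [pvOcc, PySem.List.enumerate]
  | cons x xs ih =>
    intro s
    by_cases h : x = t <;>
      simp [pvOcc, PySem.List.enumerate_cons, h, List.countP_cons, ← ih (s + 1)]

-- binary search on a list with no element equal to the target returns -1
lemma pvALoop_none (s : List (Int × Int)) (t : Int) (hne : ∀ p ∈ s, p.1 ≠ t) :
    ∀ (n : Nat) (left right : Int), (right - left + 1).toNat ≤ n →
      0 ≤ left → right < (s.length : Int) → pvALoop s t left right = -1 := by
  intro n
  induction n with
  | zero =>
    intro left right hfuel h0 hlen
    have hlr : ¬ left ≤ right := by omega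
    rw [pvALoop]; simp [hlr]
  | succ n ih =>
    intro left right hfuel h0 hlen
    rw [pvALoop]
    by_cases hlr : left ≤ right
    · simp only [hlr, dif_pos]
      have hmid := PySem.Int.floordiv_two_mid_bounds (lo := left) (hi := right) hlr
      set mid := PySem.Int.floordiv (left + right) 2 with hmiddef
      have hget : PySem.List.pyGetD s mid (0, 0) = s[mid.toNat]'(by omega) :=
        PySem.List.pyGetD_eq_getElem s (0, 0) (by omega) (by omega)
      rw [hget]
      have hmem : s[mid.toNat]'(by omega) ∈ s := List.getElem_mem _
      have hneq := hne _ hmem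
      simp only [hneq, if_false]
      by_cases hlt : (s[mid.toNat]'(by omega)).1 < t
      · simp only [hlt, if_true]
        exact ih (mid + 1) right (by omega) (by omega) hlen
      · simp only [hlt, if_false]
        exact ih left (mid - 1) (by omega) h0 (by omega)
    · simp [hlr]

-- binary search on L ++ [(t,i)] ++ G returns i when the equal position stays bracketed
lemma pvALoop_found (t i : Int) (L G : List (Int × Int))
    (hL : ∀ p ∈ L, p.1 < t) (hG : ∀ p ∈ G, t < p.1) :
    ∀ (n : Nat) (left right : Int), (right - left + 1).toNat ≤ n →
      0 ≤ left → left ≤ (L.length : Int) → (L.length : Int) ≤ right →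
      right < ((L ++ [(t, i)] ++ G).length : Int) →
      pvALoop (L ++ [(t, i)] ++ G) t left right = i := by
  intro n
  induction n with
  | zero => intro left right hfuel h0 h1 h2 hlen; exact absurd hfuel (by omega)
  | succ n ih =>
    intro left right hfuel h0 h1 h2 hlen
    have hlr : left ≤ right := by omega
    rw [pvALoop]
    simp only [hlr, dif_pos]
    have hmid := PySem.Int.floordiv_two_mid_bounds (lo := left) (hi := right) hlr
    set s := L ++ [(t, i)] ++ G with hsdef
    set mid := PySem.Int.floordiv (left + right) 2 with hmiddef
    have hslen : s.length = L.length + 1 + G.length := by simp [hsdef]; omega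
    have hmlen : mid < (s.length : Int) := by omega
    have hget : PySem.List.pyGetD s mid (0, 0) = s[mid.toNat]'(by omega) :=
      PySem.List.pyGetD_eq_getElem s (0, 0) (by omega) hmlen
    rw [hget]
    by_cases hk1 : mid.toNat < L.length
    · have hgl : s[mid.toNat]'(by omega) = L[mid.toNat]'(by omega) := by
        simp only [hsdef]
        rw [List.getElem_append_left (by simp; omega)]
        rw [List.getElem_append_left hk1]
      have hlt : (L[mid.toNat]'(by omega)).1 < t := hL _ (List.getElem_mem _)
      have hne : ¬ (L[mid.toNat]'(by omega)).1 = t := by omega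
      rw [hgl]
      simp only [hne, if_false, hlt, if_true]
      exact ih (mid + 1) right (by omega) (by omega) (by omega) (by omega) hlen
    · by_cases hk2 : mid.toNat = L.length
      · have hgl : s[mid.toNat]'(by omega) = (t, i) := by
          simp only [hsdef]
          rw [List.getElem_append_left (by simp; omega)]
          rw [List.getElem_append_right (by omega)]
          simp [hk2]
        rw [hgl]
        simp
      · have hk3 : L.length + 1 ≤ mid.toNat := by omega
        have hgl : s[mid.toNat]'(by omega) = G[mid.toNat - (L.length + 1)]'(by omega) := by
          simp only [hsdef]
          rw [List.getElem_append_right (by simp; omega)]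
          congr 1
          simp
        have hgt : t < (G[mid.toNat - (L.length + 1)]'(by omega)).1 := hG _ (List.getElem_mem _)
        have hne : ¬ (G[mid.toNat - (L.length + 1)]'(by omega)).1 = t := by omega
        have hnlt : ¬ (G[mid.toNat - (L.length + 1)]'(by omega)).1 < t := by omega
        rw [hgl]
        simp only [hne, hnlt, if_false]
        exact ih left (mid - 1) (by omega) h0 h1 (by omega) (by omega)

lemma pv_main (arr : List Int) (t : Int)
    (hpre : arr.countP (fun v => decide (v = t)) ≤ 1) :
    binary_search_with_original_index arr t = binary_search_with_original_index_alt arr t := by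
  unfold binary_search_with_original_index binary_search_with_original_index_alt
  dsimp only
  rw [pv_sorted2_eq_sorted_lex, pv_bFind_eq arr t 0]
  have hS : PySem.List.sorted ((PySem.List.enumerate arr).map (fun p => (p.2, p.1)))
      (fun p => (toLex p : Lex (Int × Int))) = pvS arr := rfl
  have hel : (((PySem.List.enumerate arr).map
      (fun (p : Int × Int) => (p.2, p.1))).length : Int) = (arr.length : Int) := by
    simp [PySem.List.length_enumerate]
  rw [hS, hel]
  set L := (pvS arr).filter (fun p => decide (p.1 < t)) with hLdef
  set G := (pvS arr).filter (fun p => decide (t < p.1)) with hGdef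
  have hL : ∀ p ∈ L, p.1 < t := by
    intro p hp; have := (List.mem_filter.mp hp).2; simpa using this
  have hG : ∀ p ∈ G, t < p.1 := by
    intro p hp; have := (List.mem_filter.mp hp).2; simpa using this
  have hlenS : (pvS arr).length = arr.length := by
    simp [pvS, PySem.List.length_sorted, PySem.List.length_enumerate]
  have hocc1 : (pvOcc arr t 0).length ≤ 1 := by rw [pv_occ_length]; exact hpre
  rcases hcase : pvOcc arr t 0 with _ | ⟨i, rest⟩
  · -- target absent: every element of the sorted list differs from t
    have hsplit := pv_split arr t
    rw [pv_eq_block, hcase] at hsplit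
    simp only [List.map_nil, List.append_nil] at hsplit
    have hne : ∀ p ∈ pvS arr, p.1 ≠ t := by
      intro p hp
      rw [hsplit, List.mem_append] at hp
      rcases hp with hp | hp
      · exact ne_of_lt (hL _ hp)
      · exact (ne_of_lt (hG _ hp)).symm
    rw [pvALoop_none (pvS arr) t hne (arr.length + 1) 0 ((arr.length : Int) - 1)
      (by omega) (by omega) (by omega)]
    rfl
  · -- target present exactly once
    have hrest : rest = [] := by
      have := hocc1; rw [hcase] at this; simp at this; exact this
    subst hrest
    have hsplit := pv_split arr t
    rw [pv_eq_block, hcase] at hsplit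
    simp only [List.map_cons, List.map_nil] at hsplit
    rw [← hLdef, ← hGdef] at hsplit
    have hlen2 : L.length + 1 + G.length = arr.length := by
      have h := congrArg List.length hsplit
      rw [hlenS, List.length_append, List.length_append, List.length_cons, List.length_nil] at h
      omega
    have hbnd : ((arr.length : Int) - 1) < ((L ++ [(t, i)] ++ G).length : Int) := by
      rw [← hsplit, hlenS]
      omega
    rw [hsplit]
    rw [pvALoop_found t i L G hL hG (arr.length + 1) 0 ((arr.length : Int) - 1)
      (by omega) (by omega) (by omega) (by omega) hbnd]
    rfl

-- ===== VERDICT (by name: the statement is the Claim_ definition above) =====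
theorem binary_search_with_original_index_spec : Claim_equal_binary_search_with_original_index := by
  intro arr target _ hpre
  unfold Spec_binary_search_with_original_index
  exact pv_main arr target hpre
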